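-- pv_equiv track=rewrite | github.com/f-giacobbe/fondamenti1 | Esercizi libro/5-remove_all_substrings.py | remove_substring
-- ===== SOURCE A (Python) =====
-- def remove_substring(substring, string):
--
--     if substring not in string:
--         return string
--
--     new_str = ""
--
--     sub_len = len(substring)
--     sub_start_index = string.index(substring)
--     sub_final_index = (sub_start_index + sub_len)-1
--
--     for i in range(len(string)):
--         if not sub_start_index <= i <= sub_final_index:
--             new_str += string[i]
--
--     return new_str
-- ===== SOURCE B (Python) =====
-- def remove_substring(substring, string):
--     if substring not in string:
--         return string
--     idx = string.index(substring)
--     return string[:idx] + string[idx + len(substring):]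
-- ===== Notes on version B (the rewrite author's own statement) =====
-- stated objective: simpler
-- what changed: Replaces the per-index loop that re-tests every position against the matched range and concatenates characters one by one with a direct construction from two slices around the found occurrence.
import Mathlib
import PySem

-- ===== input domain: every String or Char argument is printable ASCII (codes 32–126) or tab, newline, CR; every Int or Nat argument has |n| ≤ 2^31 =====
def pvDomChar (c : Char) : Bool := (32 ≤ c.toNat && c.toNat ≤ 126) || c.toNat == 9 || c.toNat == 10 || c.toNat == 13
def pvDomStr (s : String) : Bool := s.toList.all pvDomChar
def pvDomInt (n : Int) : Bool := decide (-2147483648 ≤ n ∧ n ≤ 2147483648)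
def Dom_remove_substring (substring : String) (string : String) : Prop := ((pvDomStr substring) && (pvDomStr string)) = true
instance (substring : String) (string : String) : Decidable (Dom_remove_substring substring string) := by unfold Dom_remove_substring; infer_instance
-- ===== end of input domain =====

-- B removes the found occurrence with two slices around it instead of A's per-index loop; objective: simpler.

-- ===== PORT A =====
-- literal port of A: guard, then loop over range(len(string)) appending the chars outside
-- the matched range (string[i] is in range here, so the total pyGetD with a dummy default is exact).
def remove_substring (substring : String) (string : String) : String :=
  if ¬ PySem.Str.isIn substring string then string
  else
    let cs := string.toList
    let sub_len : Int := (substring.toList.length : Int)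
    let sub_start_index : Int := PySem.Str.find string substring
    let sub_final_index : Int := (sub_start_index + sub_len) - 1
    let new_str : List Char :=
      (PySem.List.pyRange 0 (cs.length : Int) 1).foldl
        (fun acc i =>
          if ¬ (sub_start_index ≤ i ∧ i ≤ sub_final_index) then acc ++ [PySem.List.pyGetD cs i ' ']
          else acc) []
    String.ofList new_str

-- ===== PORT B =====
def remove_substring_alt (substring : String) (string : String) : String :=
  if ¬ PySem.Str.isIn substring string then string
  else
    let idx : Int := PySem.Str.find string substring
    String.ofList (PySem.List.slice string.toList none (some idx) ++
                   PySem.List.slice string.toList (some (idx + (substring.toList.length : Int))) none)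

-- ===== PRECONDITION & SPEC =====
def Spec_remove_substring (substring : String) (string : String) (out : String) : Prop := out = remove_substring_alt substring string
instance (substring : String) (string : String) (out : String) : Decidable (Spec_remove_substring substring string out) := by unfold Spec_remove_substring; infer_instance

-- ===== CLAIM (what is proved, stated in full; the proofs are below) =====
def Claim_equal_remove_substring : Prop := ∀ (substring : String) (string : String), Dom_remove_substring substring string → Spec_remove_substring substring string (remove_substring substring string)

-- ===== LEMMAS AND PROOFS =====

-- a map of pyGetD over an index segment is the corresponding slice of the list
lemma seg_map {cs : List Char} (d : Char) (a b : Nat) (hb : b ≤ cs.length) :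
    (PySem.List.pyRange (a : Int) (b : Int) 1).map (fun i => PySem.List.pyGetD cs i d)
      = (cs.drop a).take (b - a) := by
  rw [PySem.List.pyRange_one]
  have hba : ((b : Int) - (a : Int)).toNat = b - a := by omega
  rw [hba, List.map_map]
  apply List.ext_getElem
  · simp; omega
  · intro j hj1 hj2
    simp only [List.getElem_map, List.getElem_range, Function.comp]
    have hlt : a + j < cs.length := by simp at hj1; omega
    rw [show (a : Int) + (j : Int) = ((a + j : Nat) : Int) by push_cast; ring,
        PySem.List.pyGetD_natCast, List.getD_eq_getElem cs d hlt]
    simp [List.getElem_take, List.getElem_drop]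

lemma foldl_id {α β : Type} (l : List α) (acc : β) :
    l.foldl (fun acc _ => acc) acc = acc := by
  induction l generalizing acc with
  | nil => rfl
  | cons x t ih => simp only [List.foldl_cons]; exact ih acc

-- ===== VERDICT (by name: the statement is the Claim_ definition above) =====
theorem remove_substring_spec : Claim_equal_remove_substring := by
  intro substring string _
  unfold Spec_remove_substring remove_substring remove_substring_alt
  by_cases h : PySem.Str.isIn substring string
  · rw [if_neg (not_not_intro h), if_neg (not_not_intro h)]
    set cs := string.toList with hcs
    set sub := substring.toList with hsub
    have hin : PySem.Chars.isIn sub cs = true := by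
      simpa [PySem.Str.isIn_eq] using h
    have hnn : 0 ≤ PySem.Chars.find cs sub := by
      rw [PySem.Chars.find_nonneg_iff]
      exact (PySem.Chars.isIn_iff_infix sub cs).mp hin
    set k : Nat := (PySem.Chars.find cs sub).toNat with hk
    have hfk : PySem.Chars.find cs sub = (k : Int) := by omega
    set m : Nat := sub.length with hm
    have hkm : k + m ≤ cs.length := by
      have hsp := (PySem.Chars.find_spec (s := cs) (sub := sub) hnn).1
      have hlen := hsp.length_le
      rw [List.length_drop, ← hk] at hlen
      have hkl := PySem.Chars.find_le_length cs sub
      omega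
    have hfind : PySem.Str.find string substring = (k : Int) := by
      simp [PySem.Str.find_eq, ← hcs, ← hsub, hfk]
    rw [hfind]
    dsimp only
    -- B side: the two slices are take and drop
    rw [PySem.List.slice_to cs (Int.natCast_nonneg k),
        PySem.List.slice_from cs (by omega)]
    have htn1 : ((k : Int)).toNat = k := by omega
    have htn2 : ((k : Int) + ((sub.length : Nat) : Int)).toNat = k + m := by omega
    rw [htn1, htn2]
    congr 1
    -- A side: split the loop's range at k and k + m
    set F : List Char → Int → List Char := fun acc i =>
      if ¬ ((k : Int) ≤ i ∧ i ≤ (k : Int) + (m : Int) - 1) then acc ++ [PySem.List.pyGetD cs i ' ']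
      else acc with hF
    show List.foldl F [] (PySem.List.pyRange 0 (cs.length : Int) 1) = _
    rw [PySem.List.pyRange_one_append 0 (k : Int) (cs.length : Int) (by omega) (by omega),
        PySem.List.pyRange_one_append (k : Int) ((k : Int) + (m : Int)) (cs.length : Int)
          (by omega) (by exact_mod_cast by omega),
        List.foldl_append, List.foldl_append]
    have e1 : List.foldl F [] (PySem.List.pyRange 0 (k : Int) 1) = cs.take k := by
      refine (PySem.List.foldl_congr_mem
          _ F (fun acc i => acc ++ [PySem.List.pyGetD cs i ' ']) _ ?_).trans ?_
      · intro acc i hi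
        rw [PySem.List.mem_pyRange_one] at hi
        have hni : ¬ ((k : Int) ≤ i ∧ i ≤ (k : Int) + (m : Int) - 1) := by omega
        simp only [hF]
        rw [if_pos hni]
      · rw [PySem.List.foldl_append_singleton_eq_map]
        have := seg_map (cs := cs) ' ' 0 k (by omega)
        simpa using this
    have e2 : List.foldl F (cs.take k) (PySem.List.pyRange (k : Int) ((k : Int) + (m : Int)) 1)
        = cs.take k := by
      refine (PySem.List.foldl_congr_mem _ F (fun acc _ => acc) _ ?_).trans
        (foldl_id _ _)
      intro acc i hi
      rw [PySem.List.mem_pyRange_one] at hi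
      have hyi : ((k : Int) ≤ i ∧ i ≤ (k : Int) + (m : Int) - 1) := by omega
      simp only [hF]
      rw [if_neg (not_not_intro hyi)]
    have e3 : List.foldl F (cs.take k) (PySem.List.pyRange ((k : Int) + (m : Int)) (cs.length : Int) 1)
        = cs.take k ++ cs.drop (k + m) := by
      refine (PySem.List.foldl_congr_mem
          _ F (fun acc i => acc ++ [PySem.List.pyGetD cs i ' ']) _ ?_).trans ?_
      · intro acc i hi
        rw [PySem.List.mem_pyRange_one] at hi
        have hni : ¬ ((k : Int) ≤ i ∧ i ≤ (k : Int) + (m : Int) - 1) := by omega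
        simp only [hF]
        rw [if_pos hni]
      · rw [PySem.List.foldl_append_singleton_eq_map,
            show ((k : Int) + (m : Int)) = (((k + m : Nat)) : Int) by push_cast; ring,
            seg_map (cs := cs) ' ' (k + m) cs.length (le_refl _)]
        simp
    rw [e1, e2, e3]
  · rw [if_pos h, if_pos h]
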